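-- pv_equiv track=rewrite | github.com/AlanWang610/citation-gnn | create_gnn_graphs.py | standardize_journal_name
-- ===== SOURCE A (Python) =====
-- from itertools import product
--
-- def add_period_variants(names):
--     """Add variants with periods to journal names."""
--     expanded = set()
--     for name in names:
--         words = name.split()
--         for i in range(len(words)):
--             variants = [(w, w + '.') for w in words]
--             for combo in product(*variants):
--                 expanded.add(' '.join(combo))
--     return expanded
--
-- def standardize_journal_name(journal_name):
--     """Return standardized journal name."""
--     if not journal_name:
--         return None
--
--     journal_name = journal_name.lower()
--
--     # Define journal name sets
--     jf_names = {"j finan", "journal finan", "j financ", "journal financ", "j finance", "journal finance",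
--                 "j of finan", "journal of finan", "j of financ", "journal of financ", "j of finance",
--                 "journal of finance"}
--
--     jfe_names = {"j finan econ", "journal finan econ", "j financ econ", "journal financ econ",
--                  "j finance econ", "journal finance econ", "j of finan econ", "journal of finan econ",
--                  "j of financ econ", "journal of financ econ", "j of finance econ",
--                  "journal of finance econ", "journal of financial economics"}
--
--     rfs_names = {"rev finan stud", "review finan stud", "rev financ stud", "review financ stud",
--                  "rev finance stud", "review finance stud", "rev of finan stud", "review of finan stud",
--                  "rev of financ stud", "review of financ stud", "rev of finance stud",
--                  "review of finance stud", "review of financial studies"}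
--
--     aer_names = {"am econ rev", "ame econ rev", "amer econ rev", "american econ rev", "am econ review",
--                  "ame econ review", "amer econ review", "american econ review", "american economic review"}
--
--     econometrica_names = {"econometrica"}
--
--     qje_names = {"q j econ", "q j of econ", "q j economics", "q j of economics", "quart j econ",
--                  "quart j of econ", "quart j economics", "quart j of economics", "quarterly j econ",
--                  "quarterly j of econ", "quarterly j economnics", "quarterly j of economnics",
--                  "quarterly journal economics", "quarterly journal of economics"}
--
--     res_names = {"rev econ stud", "review of economics studies", "review of economic studies"}
--
--     jpe_names = {"j polit econ", "j polit economics", "j political econ", "j political economics",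
--                  "journal of political economy"}
--
--     # Add period variants
--     jf_names = add_period_variants(jf_names)
--     jfe_names = add_period_variants(jfe_names)
--     rfs_names = add_period_variants(rfs_names)
--     aer_names = add_period_variants(aer_names)
--     econometrica_names = add_period_variants(econometrica_names)
--     qje_names = add_period_variants(qje_names)
--     res_names = add_period_variants(res_names)
--     jpe_names = add_period_variants(jpe_names)
--
--     # Add 'the' variants
--     for name_set in [jf_names, jfe_names, rfs_names, aer_names, econometrica_names, qje_names, res_names, jpe_names]:
--         name_set.update({f"the {name}" for name in name_set})
--
--     # Journal name mapping
--     if any(name in journal_name for name in jfe_names):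
--         return "Journal of Financial Economics"
--     elif any(name in journal_name for name in jf_names):
--         return "Journal of Finance"
--     elif any(name in journal_name for name in rfs_names):
--         return "Review of Financial Studies"
--     elif any(name in journal_name for name in aer_names):
--         return "American Economic Review"
--     elif any(name in journal_name for name in econometrica_names):
--         return "Econometrica"
--     elif any(name in journal_name for name in qje_names):
--         return "Quarterly Journal of Economics"
--     elif any(name in journal_name for name in res_names):
--         return "Review of Economic Studies"
--     elif any(name in journal_name for name in jpe_names):
--         return "Journal of Political Economy"
--
--     return None
-- ===== SOURCE B (Python) =====
-- # Same mapping, but instead of enumerating the Cartesian product of period-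
-- # variants (and redundant "the " variants) into big sets, match each base name
-- # directly with a tiny scanner: words separated by single spaces, each word
-- # optionally followed by a period.
--
-- _GROUPS = [
--     ("Journal of Financial Economics", [n.split() for n in [
--         "j finan econ", "journal finan econ", "j financ econ", "journal financ econ",
--         "j finance econ", "journal finance econ", "j of finan econ", "journal of finan econ",
--         "j of financ econ", "journal of financ econ", "j of finance econ",
--         "journal of finance econ", "journal of financial economics"]]),
--     ("Journal of Finance", [n.split() for n in [
--         "j finan", "journal finan", "j financ", "journal financ", "j finance",
--         "journal finance", "j of finan", "journal of finan", "j of financ",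
--         "journal of financ", "j of finance", "journal of finance"]]),
--     ("Review of Financial Studies", [n.split() for n in [
--         "rev finan stud", "review finan stud", "rev financ stud", "review financ stud",
--         "rev finance stud", "review finance stud", "rev of finan stud", "review of finan stud",
--         "rev of financ stud", "review of financ stud", "rev of finance stud",
--         "review of finance stud", "review of financial studies"]]),
--     ("American Economic Review", [n.split() for n in [
--         "am econ rev", "ame econ rev", "amer econ rev", "american econ rev", "am econ review",
--         "ame econ review", "amer econ review", "american econ review", "american economic review"]]),
--     ("Econometrica", [["econometrica"]]),
--     ("Quarterly Journal of Economics", [n.split() for n in [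
--         "q j econ", "q j of econ", "q j economics", "q j of economics", "quart j econ",
--         "quart j of econ", "quart j economics", "quart j of economics", "quarterly j econ",
--         "quarterly j of econ", "quarterly j economnics", "quarterly j of economnics",
--         "quarterly journal economics", "quarterly journal of economics"]]),
--     ("Review of Economic Studies", [n.split() for n in [
--         "rev econ stud", "review of economics studies", "review of economic studies"]]),
--     ("Journal of Political Economy", [n.split() for n in [
--         "j polit econ", "j polit economics", "j political econ", "j political economics",
--         "journal of political economy"]]),
-- ]
--
--
-- def _match_here(text, words, pos):
--     """words[0] is known to occur at pos; do the remaining words follow, each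
--     preceded by an optional period and a single space?"""
--     pos += len(words[0])
--     for w in words[1:]:
--         if text.startswith('.', pos):
--             pos += 1
--         if not text.startswith(' ', pos):
--             return False
--         pos += 1
--         if not text.startswith(w, pos):
--             return False
--         pos += len(w)
--     return True
--
--
-- def _contains_pattern(text, words):
--     """Does the pattern occur anywhere in text?  Jump between occurrences of
--     the first word instead of scanning every position."""
--     i = text.find(words[0])
--     while i != -1:
--         if _match_here(text, words, i):
--             return True
--         i = text.find(words[0], i + 1)
--     return False
--
--
-- def standardize_journal_name(journal_name):
--     """Return standardized journal name."""
--     text = journal_name.lower()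
--     for canonical, patterns in _GROUPS:
--         if any(_contains_pattern(text, words) for words in patterns):
--             return canonical
--     return None
-- ===== Notes on version B (the rewrite author's own statement) =====
-- stated objective: alternative
-- what changed: Instead of enumerating, on every call, the Cartesian product of per-word period variants (plus redundant 'the ' variants) into eight large sets and substring-testing each variant, B matches each base name directly: it jumps between occurrences of the pattern's first word and checks the remaining words there (word, optional '.', single space), in the same group priority order.
import Mathlib
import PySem

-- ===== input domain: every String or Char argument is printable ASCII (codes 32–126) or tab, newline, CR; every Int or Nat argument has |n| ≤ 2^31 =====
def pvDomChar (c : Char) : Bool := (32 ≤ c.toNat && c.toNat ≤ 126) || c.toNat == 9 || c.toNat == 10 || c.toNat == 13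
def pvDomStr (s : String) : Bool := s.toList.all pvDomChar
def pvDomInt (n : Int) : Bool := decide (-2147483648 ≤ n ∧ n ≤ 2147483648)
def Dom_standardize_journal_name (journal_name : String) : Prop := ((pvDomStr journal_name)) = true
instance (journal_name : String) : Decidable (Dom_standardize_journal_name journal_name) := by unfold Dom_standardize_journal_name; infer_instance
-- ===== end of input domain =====

-- B replaces A's per-call Cartesian-product enumeration of period/'the' variants into sets
-- with a direct per-base-name scanner that jumps between occurrences of the first word
-- (objective: alternative).

-- ===== PORT A =====

-- hand port of itertools.product over a list of choice lists (CPython order: rightmost varies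
-- fastest); exact: every tuple of choices, as a list
def pvProduct {α : Type} : List (List α) → List (List α)
  | [] => [[]]
  | xs :: rest => xs.flatMap (fun x => (pvProduct rest).map (x :: ·))

-- the base-name set literals of A (Python str as List Char)
def pvJfNames : List (List Char) :=
  ["j finan".toList, "journal finan".toList, "j financ".toList, "journal financ".toList,
   "j finance".toList, "journal finance".toList, "j of finan".toList, "journal of finan".toList,
   "j of financ".toList, "journal of financ".toList, "j of finance".toList,
   "journal of finance".toList]

def pvJfeNames : List (List Char) :=
  ["j finan econ".toList, "journal finan econ".toList, "j financ econ".toList,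
   "journal financ econ".toList, "j finance econ".toList, "journal finance econ".toList,
   "j of finan econ".toList, "journal of finan econ".toList, "j of financ econ".toList,
   "journal of financ econ".toList, "j of finance econ".toList,
   "journal of finance econ".toList, "journal of financial economics".toList]

def pvRfsNames : List (List Char) :=
  ["rev finan stud".toList, "review finan stud".toList, "rev financ stud".toList,
   "review financ stud".toList, "rev finance stud".toList, "review finance stud".toList,
   "rev of finan stud".toList, "review of finan stud".toList, "rev of financ stud".toList,
   "review of financ stud".toList, "rev of finance stud".toList,
   "review of finance stud".toList, "review of financial studies".toList]

def pvAerNames : List (List Char) :=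
  ["am econ rev".toList, "ame econ rev".toList, "amer econ rev".toList,
   "american econ rev".toList, "am econ review".toList, "ame econ review".toList,
   "amer econ review".toList, "american econ review".toList,
   "american economic review".toList]

def pvEconometricaNames : List (List Char) := ["econometrica".toList]

def pvQjeNames : List (List Char) :=
  ["q j econ".toList, "q j of econ".toList, "q j economics".toList, "q j of economics".toList,
   "quart j econ".toList, "quart j of econ".toList, "quart j economics".toList,
   "quart j of economics".toList, "quarterly j econ".toList, "quarterly j of econ".toList,
   "quarterly j economnics".toList, "quarterly j of economnics".toList,
   "quarterly journal economics".toList, "quarterly journal of economics".toList]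

def pvResNames : List (List Char) :=
  ["rev econ stud".toList, "review of economics studies".toList,
   "review of economic studies".toList]

def pvJpeNames : List (List Char) :=
  ["j polit econ".toList, "j polit economics".toList, "j political econ".toList,
   "j political economics".toList, "journal of political economy".toList]

-- def add_period_variants(names): each word optionally gets a trailing '.', all combinations,
-- joined by ' '; the (w, w+'.') tuple is modelled as the 2-element list [w, w ++ ['.']]
def add_period_variants (names : PySem.Set (List Char)) : PySem.Set (List Char) :=
  names.foldl (fun expanded name =>
    let words := PySem.Chars.split₀ name
    (PySem.List.pyRange 0 (words.length : Int) 1).foldl (fun expanded _i =>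
      (pvProduct (words.map (fun w => [w, w ++ ['.']]))).foldl
        (fun expanded combo => PySem.Set.add expanded (PySem.Chars.join [' '] combo))
        expanded)
      expanded)
    PySem.Set.empty

-- the body of A's loop "name_set.update({f'the {name}' for name in name_set})"
def pvAddThe (s : PySem.Set (List Char)) : PySem.Set (List Char) :=
  PySem.Set.update s (PySem.Set.ofList (s.map (fun name => "the ".toList ++ name)))

def standardize_journal_name (journal_name : String) : Option String :=
  if journal_name.toList = [] then none
  else
    let jn := PySem.Chars.lower journal_name.toList
    let jf_names := pvAddThe (add_period_variants (PySem.Set.ofList pvJfNames))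
    let jfe_names := pvAddThe (add_period_variants (PySem.Set.ofList pvJfeNames))
    let rfs_names := pvAddThe (add_period_variants (PySem.Set.ofList pvRfsNames))
    let aer_names := pvAddThe (add_period_variants (PySem.Set.ofList pvAerNames))
    let econometrica_names := pvAddThe (add_period_variants (PySem.Set.ofList pvEconometricaNames))
    let qje_names := pvAddThe (add_period_variants (PySem.Set.ofList pvQjeNames))
    let res_names := pvAddThe (add_period_variants (PySem.Set.ofList pvResNames))
    let jpe_names := pvAddThe (add_period_variants (PySem.Set.ofList pvJpeNames))
    if jfe_names.any (fun name => PySem.Chars.isIn name jn) then some "Journal of Financial Economics"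
    else if jf_names.any (fun name => PySem.Chars.isIn name jn) then some "Journal of Finance"
    else if rfs_names.any (fun name => PySem.Chars.isIn name jn) then some "Review of Financial Studies"
    else if aer_names.any (fun name => PySem.Chars.isIn name jn) then some "American Economic Review"
    else if econometrica_names.any (fun name => PySem.Chars.isIn name jn) then some "Econometrica"
    else if qje_names.any (fun name => PySem.Chars.isIn name jn) then some "Quarterly Journal of Economics"
    else if res_names.any (fun name => PySem.Chars.isIn name jn) then some "Review of Economic Studies"
    else if jpe_names.any (fun name => PySem.Chars.isIn name jn) then some "Journal of Political Economy"
    else none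

-- ===== PORT B =====

-- def _match_here(text, words, pos): words[0] is known to occur at pos; check the remaining
-- words, each preceded by an optional '.' and a single ' '.  text.startswith(sub, pos) for
-- nonempty sub is exact as a prefix test on text.drop pos (a start past the end never matches)
def pvMatchHere (text : List Char) : List (List Char) → Nat → Bool
  | [], _ => true
  | w :: ws, pos =>
    let pos' := if PySem.Chars.startswith (text.drop pos) ['.'] then pos + 1 else pos
    if PySem.Chars.startswith (text.drop pos') [' '] then
      if PySem.Chars.startswith (text.drop (pos' + 1)) w then
        pvMatchHere text ws (pos' + 1 + w.length)
      else false
    else false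

-- the while-loop of _contains_pattern: i is the current occurrence of words[0];
-- the hstop branch only totalises the recursion (a find start past the end is -1)
def pvContainsGo (text w0 : List Char) (ws : List (List Char)) (i : Nat) : Bool :=
  if pvMatchHere text ws (i + w0.length) then true
  else if hstop : text.length < i + 1 then false
  else
    if hj : PySem.Chars.findFrom text w0 ((i + 1 : Nat) : Int) none = -1 then false
    else pvContainsGo text w0 ws (PySem.Chars.findFrom text w0 ((i + 1 : Nat) : Int) none).toNat
termination_by text.length - i
decreasing_by
  have hk : i + 1 ≤ text.length := by omega
  have hs := (PySem.Chars.findFrom_natCast_spec text w0 (i + 1) hk hj).1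
  omega

-- def _contains_pattern(text, words): jump between occurrences of words[0]
def pvContains (words : List (List Char)) (text : List Char) : Bool :=
  match words with
  | [] => false  -- not reached by B (every pattern is nonempty; Python would raise IndexError)
  | w0 :: rest =>
    if PySem.Chars.find text w0 = -1 then false
    else pvContainsGo text w0 rest (PySem.Chars.find text w0).toNat

-- _GROUPS: (canonical name, word lists of the base names), in A's check order;
-- Source B computes the word lists by n.split() over the same base-name literals
def pvGroups : List (String × List (List (List Char))) :=
  [("Journal of Financial Economics", pvJfeNames.map PySem.Chars.split₀),
   ("Journal of Finance", pvJfNames.map PySem.Chars.split₀),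
   ("Review of Financial Studies", pvRfsNames.map PySem.Chars.split₀),
   ("American Economic Review", pvAerNames.map PySem.Chars.split₀),
   ("Econometrica", pvEconometricaNames.map PySem.Chars.split₀),
   ("Quarterly Journal of Economics", pvQjeNames.map PySem.Chars.split₀),
   ("Review of Economic Studies", pvResNames.map PySem.Chars.split₀),
   ("Journal of Political Economy", pvJpeNames.map PySem.Chars.split₀)]

def standardize_journal_name_alt (journal_name : String) : Option String :=
  let text := PySem.Chars.lower journal_name.toList
  (pvGroups.find? (fun g => g.2.any (fun ws => pvContains ws text))).map (fun g => g.1)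

-- ===== PRECONDITION & SPEC =====
def Spec_standardize_journal_name (journal_name : String) (out : Option String) : Prop := out = standardize_journal_name_alt journal_name
instance (journal_name : String) (out : Option String) : Decidable (Spec_standardize_journal_name journal_name out) := by unfold Spec_standardize_journal_name; infer_instance

-- ===== CLAIM (what is proved, stated in full; the proofs are below) =====
def Claim_equal_standardize_journal_name : Prop := ∀ (journal_name : String), Dom_standardize_journal_name journal_name → Spec_standardize_journal_name journal_name (standardize_journal_name journal_name)

-- ===== LEMMAS AND PROOFS =====

-- the period variants of a word list, as A's product/join builds them
def pvVs (ws : List (List Char)) : List (List Char) :=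
  (pvProduct (ws.map (fun w => [w, w ++ ['.']]))).map (PySem.Chars.join [' '])

theorem pvPrefixAppend (x l t : List Char) :
    (x ++ l <+: t) ↔ x <+: t ∧ l <+: t.drop x.length := by
  constructor
  · rintro ⟨s, rfl⟩
    refine ⟨⟨l ++ s, by simp⟩, ?_⟩
    simp
  · rintro ⟨⟨s, rfl⟩, h2⟩
    rw [List.drop_append] at h2
    simp at h2
    obtain ⟨u, hu⟩ := h2
    exact ⟨u, by simp [← hu]⟩

theorem pvProduct_length {α : Type} (l : List (List α)) (c : List α)
    (hc : c ∈ pvProduct l) : c.length = l.length := by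
  induction l generalizing c with
  | nil => simp [pvProduct] at hc; simp [hc]
  | cons xs rest ih =>
    simp [pvProduct] at hc
    obtain ⟨x, -, c', hc', rfl⟩ := hc
    simp [ih c' hc']

theorem pvVs_pair (w : List Char) : pvVs [w] = [w, w ++ ['.']] := by
  simp [pvVs, pvProduct, PySem.Chars.join_singleton]

theorem pvNotDotSpace (r : List Char) : ¬ ([' '] <+: r ∧ ['.'] <+: r) := by
  rintro ⟨h1, h2⟩
  rcases List.cons_prefix_iff.mp h1 with ⟨t1, ht1, -⟩
  rcases List.cons_prefix_iff.mp h2 with ⟨t2, ht2, -⟩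
  rw [ht1] at ht2
  injection ht2 with hc
  exact absurd hc (by decide)

-- proof-side reference scanner: prefix-match of the whole pattern against a suffix
def pvMatchAt : List (List Char) → List Char → Bool
  | [], _ => true
  | w :: ws, text =>
    if PySem.Chars.startswith text w then
      let rest := text.drop w.length
      if ws = [] then true
      else
        let rest' := if PySem.Chars.startswith rest ['.'] then rest.drop 1 else rest
        if PySem.Chars.startswith rest' [' '] then pvMatchAt ws (rest'.drop 1) else false
    else false

theorem pvMatchAt_iff (ws : List (List Char)) (hne : ws ≠ []) (t : List Char) :
    (∃ v ∈ pvVs ws, v <+: t) ↔ pvMatchAt ws t = true := by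
  induction ws generalizing t with
  | nil => exact absurd rfl hne
  | cons w ws ih =>
    by_cases hws : ws = []
    · subst hws
      rw [pvVs_pair]
      have hm : pvMatchAt [w] t = (if PySem.Chars.startswith t w then true else false) := by
        simp [pvMatchAt]
      rw [hm]
      simp only [PySem.Chars.startswith_iff]
      constructor
      · rintro ⟨v, hv, hp⟩
        simp only [List.mem_cons, List.not_mem_nil, or_false] at hv
        rcases hv with rfl | rfl
        · simp [hp]
        · simp [(List.prefix_append w ['.']).trans hp]
      · by_cases hw : w <+: t
        · exact fun _ => ⟨w, by simp, hw⟩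
        · intro h
          rw [if_neg hw] at h
          simp at h
    · -- variants of (w :: ws) are x ++ ' ' :: u with x ∈ {w, w.'}, u a variant of ws
      have hmem : ∀ v, v ∈ pvVs (w :: ws) ↔
          ∃ x ∈ [w, w ++ ['.']], ∃ u ∈ pvVs ws, v = x ++ ' ' :: u := by
        intro v
        simp only [pvVs, List.map_cons, pvProduct, List.mem_map, List.mem_flatMap]
        constructor
        · rintro ⟨c, ⟨x, hx, c', hc', rfl⟩, rfl⟩
          have hlen := pvProduct_length _ c' hc'
          match ws, c' with
          | [], _ => exact absurd rfl hws
          | _ :: _, [] => simp at hlen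
          | w2 :: ws2, y :: c2 =>
            refine ⟨x, hx, PySem.Chars.join [' '] (y :: c2), ⟨y :: c2, hc', rfl⟩, ?_⟩
            rw [PySem.Chars.join_cons_cons]
            simp
        · rintro ⟨x, hx, u, ⟨c', hc', rfl⟩, rfl⟩
          have hlen := pvProduct_length _ c' hc'
          match ws, c' with
          | [], _ => exact absurd rfl hws
          | _ :: _, [] => simp at hlen
          | w2 :: ws2, y :: c2 =>
            refine ⟨x :: y :: c2, ⟨x, hx, y :: c2, hc', rfl⟩, ?_⟩
            rw [PySem.Chars.join_cons_cons]
            simp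
      -- canonical decomposition of prefix-match of each variant shape
      have key1 : ∀ u : List Char, (w ++ ' ' :: u <+: t) ↔
          w <+: t ∧ [' '] <+: t.drop w.length ∧ u <+: (t.drop w.length).drop 1 := by
        intro u
        have h1 : w ++ ' ' :: u = w ++ ([' '] ++ u) := by simp
        rw [h1, pvPrefixAppend, pvPrefixAppend]
        simp
      have key2 : ∀ u : List Char, ((w ++ ['.']) ++ ' ' :: u <+: t) ↔
          w <+: t ∧ ['.'] <+: t.drop w.length ∧ [' '] <+: (t.drop w.length).drop 1 ∧
            u <+: ((t.drop w.length).drop 1).drop 1 := by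
        intro u
        have h1 : (w ++ ['.']) ++ ' ' :: u = (w ++ ['.']) ++ ([' '] ++ u) := by simp
        rw [h1, pvPrefixAppend, pvPrefixAppend, pvPrefixAppend]
        have hd : t.drop (w ++ ['.']).length = (t.drop w.length).drop 1 := by
          rw [List.length_append, List.length_singleton, ← List.drop_drop]
        rw [hd]
        simp [and_assoc]
      have hL : (∃ v ∈ pvVs (w :: ws), v <+: t) ↔
          (∃ u ∈ pvVs ws, w ++ ' ' :: u <+: t) ∨
          (∃ u ∈ pvVs ws, (w ++ ['.']) ++ ' ' :: u <+: t) := by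
        constructor
        · rintro ⟨v, hv, hp⟩
          rcases (hmem v).mp hv with ⟨x, hx, u, hu, rfl⟩
          simp only [List.mem_cons, List.not_mem_nil, or_false] at hx
          rcases hx with rfl | rfl
          · exact Or.inl ⟨u, hu, hp⟩
          · exact Or.inr ⟨u, hu, hp⟩
        · rintro (⟨u, hu, hp⟩ | ⟨u, hu, hp⟩)
          · exact ⟨_, (hmem _).mpr ⟨w, by simp, u, hu, rfl⟩, hp⟩
          · exact ⟨_, (hmem _).mpr ⟨w ++ ['.'], by simp, u, hu, rfl⟩, hp⟩
      have hun : pvMatchAt (w :: ws) t =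
          (if PySem.Chars.startswith t w then
            (let rest := t.drop w.length
             let rest' := if PySem.Chars.startswith rest ['.'] then rest.drop 1 else rest
             if PySem.Chars.startswith rest' [' '] then pvMatchAt ws (rest'.drop 1) else false)
          else false) := by
        simp only [pvMatchAt, if_neg hws]
      rw [hL, hun]
      simp only [PySem.Chars.startswith_iff]
      by_cases hw : w <+: t
      · by_cases hdot : ['.'] <+: t.drop w.length
        · rw [if_pos hw, if_pos hdot]
          by_cases hsp : [' '] <+: (t.drop w.length).drop 1
          · rw [if_pos hsp, ← ih hws]
            constructor
            · rintro (⟨u, hu, hp⟩ | ⟨u, hu, hp⟩)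
              · exact absurd ⟨((key1 u).mp hp).2.1, hdot⟩ (pvNotDotSpace _)
              · exact ⟨u, hu, ((key2 u).mp hp).2.2.2⟩
            · rintro ⟨u, hu, hp⟩
              exact Or.inr ⟨u, hu, (key2 u).mpr ⟨hw, hdot, hsp, hp⟩⟩
          · rw [if_neg hsp]
            constructor
            · rintro (⟨u, hu, hp⟩ | ⟨u, hu, hp⟩)
              · exact absurd ⟨((key1 u).mp hp).2.1, hdot⟩ (pvNotDotSpace _)
              · exact absurd ((key2 u).mp hp).2.2.1 hsp
            · simp
        · rw [if_pos hw, if_neg hdot]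
          by_cases hsp : [' '] <+: t.drop w.length
          · rw [if_pos hsp, ← ih hws]
            constructor
            · rintro (⟨u, hu, hp⟩ | ⟨u, hu, hp⟩)
              · exact ⟨u, hu, ((key1 u).mp hp).2.2⟩
              · exact absurd ((key2 u).mp hp).2.1 hdot
            · rintro ⟨u, hu, hp⟩
              exact Or.inl ⟨u, hu, (key1 u).mpr ⟨hw, hsp, hp⟩⟩
          · rw [if_neg hsp]
            constructor
            · rintro (⟨u, hu, hp⟩ | ⟨u, hu, hp⟩)
              · exact absurd ((key1 u).mp hp).2.1 hsp
              · exact absurd ((key2 u).mp hp).2.1 hdot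
            · simp
      · rw [if_neg hw]
        constructor
        · rintro (⟨u, hu, hp⟩ | ⟨u, hu, hp⟩)
          · exact absurd ((key1 u).mp hp).1 hw
          · exact absurd ((key2 u).mp hp).1 hw
        · simp

theorem pvAlign (t : List Char) (ws : List (List Char)) (w : List Char) (p : Nat) :
    pvMatchAt (w :: ws) (t.drop p) =
      (PySem.Chars.startswith (t.drop p) w && pvMatchHere t ws (p + w.length)) := by
  induction ws generalizing w p with
  | nil =>
    by_cases hw : PySem.Chars.startswith (t.drop p) w
    · simp [pvMatchAt, pvMatchHere, hw]
    · simp [pvMatchAt, hw]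
  | cons w2 ws2 ih =>
    by_cases hw : PySem.Chars.startswith (t.drop p) w
    · have hd1 : (t.drop p).drop w.length = t.drop (p + w.length) := by
        simp [List.drop_drop]
      have hun : pvMatchAt (w :: w2 :: ws2) (t.drop p) =
          (let rest := (t.drop p).drop w.length
           let rest' := if PySem.Chars.startswith rest ['.'] then rest.drop 1 else rest
           if PySem.Chars.startswith rest' [' '] then pvMatchAt (w2 :: ws2) (rest'.drop 1)
           else false) := by
        simp only [pvMatchAt, if_pos hw, if_neg (by simp : ¬(w2 :: ws2 = []))]
      rw [hun]
      simp only [hd1, hw, Bool.true_and]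
      by_cases hdot : PySem.Chars.startswith (t.drop (p + w.length)) ['.']
      · have hd2 : (t.drop (p + w.length)).drop 1 = t.drop (p + w.length + 1) := by
          simp [List.drop_drop]
        simp only [if_pos hdot, hd2]
        show _ = pvMatchHere t (w2 :: ws2) (p + w.length)
        simp only [pvMatchHere, if_pos hdot]
        by_cases hsp : PySem.Chars.startswith (t.drop (p + w.length + 1)) [' ']
        · have hd3 : (t.drop (p + w.length + 1)).drop 1 = t.drop (p + w.length + 1 + 1) := by
            simp [List.drop_drop, Nat.add_comm]
          simp only [if_pos hsp, hd3, ih]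
          split_ifs with hA
          · simp [hA]
          · simp [hA]
        · simp [hsp]
      · simp only [if_neg hdot]
        show _ = pvMatchHere t (w2 :: ws2) (p + w.length)
        simp only [pvMatchHere, if_neg hdot]
        by_cases hsp : PySem.Chars.startswith (t.drop (p + w.length)) [' ']
        · have hd3 : (t.drop (p + w.length)).drop 1 = t.drop (p + w.length + 1) := by
            simp [List.drop_drop]
          simp only [if_pos hsp, hd3, ih]
          split_ifs with hA
          · simp [hA]
          · simp [hA]
        · simp [hsp]
    · simp [pvMatchAt, pvMatchHere, hw]

theorem pvNoMatchBeyond (t w0 : List Char) (hw0 : w0 ≠ []) (ws : List (List Char)) (n : Nat)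
    (hn : t.length ≤ n) : pvMatchAt (w0 :: ws) (t.drop n) = false := by
  rw [pvAlign]
  have : t.drop n = [] := List.drop_eq_nil_of_le hn
  rw [this]
  have : ¬ (w0 <+: ([] : List Char)) := by
    intro h
    exact hw0 (List.prefix_nil.mp h)
  simp [PySem.Chars.startswith_iff, this]

theorem pvPrefixOfDropInfix (t w0 : List Char) (k n : Nat) (hkn : k ≤ n)
    (h : w0 <+: t.drop n) : w0 <:+: t.drop k := by
  have hdd : (t.drop k).drop (n - k) = t.drop n := by
    rw [List.drop_drop]; congr 1; omega
  exact (h.isInfix).trans (hdd ▸ (t.drop k).drop_suffix (n - k)).isInfix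

theorem pvGoIff (t w0 : List Char) (hw0 : w0 ≠ []) (ws : List (List Char)) :
    ∀ d i, t.length - i = d → i ≤ t.length → w0 <+: t.drop i →
      (pvContainsGo t w0 ws i = true ↔
        ∃ n, i ≤ n ∧ pvMatchAt (w0 :: ws) (t.drop n) = true) := by
  intro d
  induction d using Nat.strong_induction_on with
  | _ d ihd =>
    intro i hd hi hocc
    rw [pvContainsGo]
    by_cases h1 : pvMatchHere t ws (i + w0.length) = true
    · simp only [if_pos h1, true_iff]
      refine ⟨i, le_refl i, ?_⟩
      rw [pvAlign]
      simp [PySem.Chars.startswith_iff, hocc, h1]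
    · rw [if_neg h1]
      have hmatch_i : pvMatchAt (w0 :: ws) (t.drop i) = false := by
        rw [pvAlign]
        simp [h1]
      by_cases h2 : t.length < i + 1
      · rw [dif_pos h2]
        simp only [Bool.false_eq_true, false_iff, not_exists, not_and]
        intro n hn hm
        rcases Nat.eq_or_lt_of_le hn with rfl | hlt
        · rw [hmatch_i] at hm; exact Bool.false_ne_true hm
        · rw [pvNoMatchBeyond t w0 hw0 ws n (by omega)] at hm
          exact Bool.false_ne_true hm
      · rw [dif_neg h2]
        have hk : i + 1 ≤ t.length := by omega
        by_cases hj : PySem.Chars.findFrom t w0 ((i + 1 : Nat) : Int) none = -1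
        · rw [dif_pos hj]
          have hnone : ¬ w0 <:+: t.drop (i + 1) :=
            (PySem.Chars.findFrom_natCast_eq_neg_one_iff t w0 (i + 1) hk).mp hj
          simp only [Bool.false_eq_true, false_iff, not_exists, not_and]
          intro n hn hm
          rcases Nat.eq_or_lt_of_le hn with rfl | hlt
          · rw [hmatch_i] at hm; exact Bool.false_ne_true hm
          · have hpre : w0 <+: t.drop n := by
              have := pvAlign t ws w0 n
              rw [this] at hm
              rcases Bool.and_eq_true_iff.mp hm with ⟨ha, -⟩
              exact (PySem.Chars.startswith_iff _ _).mp ha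
            exact hnone (pvPrefixOfDropInfix t w0 (i + 1) n (by omega) hpre)
        · rw [dif_neg hj]
          obtain ⟨hge, hpre, hmin⟩ := PySem.Chars.findFrom_natCast_spec t w0 (i + 1) hk hj
          set j := PySem.Chars.findFrom t w0 ((i + 1 : Nat) : Int) none with hjdef
          have hjn : i + 1 ≤ j.toNat := by omega
          have hjlen : j.toNat ≤ t.length := by
            by_contra hc
            have : t.drop j.toNat = [] := List.drop_eq_nil_of_le (by omega)
            rw [this] at hpre
            exact hw0 (List.prefix_nil.mp hpre)
          have ihj := ihd (t.length - j.toNat) (by omega) j.toNat rfl hjlen hpre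
          rw [ihj]
          constructor
          · rintro ⟨n, hn, hm⟩
            exact ⟨n, by omega, hm⟩
          · rintro ⟨n, hn, hm⟩
            refine ⟨n, ?_, hm⟩
            rcases Nat.eq_or_lt_of_le hn with rfl | hlt
            · rw [hmatch_i] at hm; exact absurd hm Bool.false_ne_true
            · by_contra hc
              have hpre' : w0 <+: t.drop n := by
                rw [pvAlign] at hm
                rcases Bool.and_eq_true_iff.mp hm with ⟨ha, -⟩
                exact (PySem.Chars.startswith_iff _ _).mp ha
              exact hmin n (by omega) (by omega) hpre'

theorem pvContainsExists (ws : List (List Char)) (hne : ws ≠ [])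
    (hw : ∀ w ∈ ws, w ≠ []) (t : List Char) :
    pvContains ws t = true ↔ ∃ n, pvMatchAt ws (t.drop n) = true := by
  match ws, hne with
  | w0 :: rest, _ =>
    have hw0 : w0 ≠ [] := hw w0 (by simp)
    rw [show pvContains (w0 :: rest) t =
        (if PySem.Chars.find t w0 = -1 then false
         else pvContainsGo t w0 rest (PySem.Chars.find t w0).toNat) from rfl]
    by_cases hf : PySem.Chars.find t w0 = -1
    · rw [if_pos hf]
      have hno : ¬ w0 <:+: t := (PySem.Chars.find_eq_neg_one_iff t w0).mp hf
      simp only [Bool.false_eq_true, false_iff, not_exists]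
      intro n hm
      have hpre : w0 <+: t.drop n := by
        rw [pvAlign] at hm
        rcases Bool.and_eq_true_iff.mp hm with ⟨ha, -⟩
        exact (PySem.Chars.startswith_iff _ _).mp ha
      exact hno (by simpa using pvPrefixOfDropInfix t w0 0 n (Nat.zero_le n) hpre)
    · rw [if_neg hf]
      have hnn : 0 ≤ PySem.Chars.find t w0 := by
        rcases (PySem.Chars.neg_one_le_find t w0).lt_or_eq with h | h
        · omega
        · exact absurd h.symm hf
      obtain ⟨hpre, hmin⟩ := PySem.Chars.find_spec hnn
      set j := (PySem.Chars.find t w0).toNat with hjdef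
      have hjlen : j ≤ t.length := by
        by_contra hc
        have : t.drop j = [] := List.drop_eq_nil_of_le (by omega)
        rw [this] at hpre
        exact hw0 (List.prefix_nil.mp hpre)
      rw [pvGoIff t w0 hw0 rest (t.length - j) j rfl hjlen hpre]
      constructor
      · rintro ⟨n, -, hm⟩
        exact ⟨n, hm⟩
      · rintro ⟨n, hm⟩
        refine ⟨n, ?_, hm⟩
        by_contra hc
        have hpre' : w0 <+: t.drop n := by
          rw [pvAlign] at hm
          rcases Bool.and_eq_true_iff.mp hm with ⟨ha, -⟩
          exact (PySem.Chars.startswith_iff _ _).mp ha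
        exact hmin n (by omega) hpre'

theorem pvContains_iff (ws : List (List Char)) (hne : ws ≠ [])
    (hw : ∀ w ∈ ws, w ≠ []) (t : List Char) :
    pvContains ws t = true ↔ ∃ v ∈ pvVs ws, v <:+: t := by
  rw [pvContainsExists ws hne hw t]
  constructor
  · rintro ⟨n, hm⟩
    rcases (pvMatchAt_iff ws hne (t.drop n)).mpr hm with ⟨v, hv, hp⟩
    exact ⟨v, hv, (hp.isInfix).trans (t.drop_suffix n).isInfix⟩
  · rintro ⟨v, hv, hinf⟩
    rcases List.infix_iff_prefix_suffix.mp hinf with ⟨s, hps, hss⟩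
    rcases hss with ⟨pre, rfl⟩
    refine ⟨pre.length, (pvMatchAt_iff ws hne _).mp ⟨v, hv, ?_⟩⟩
    simpa using hps

theorem pvMemFoldlAdd (L : List (List (List Char))) (e : PySem.Set (List Char)) (x : List Char) :
    (x ∈ L.foldl (fun e c => PySem.Set.add e (PySem.Chars.join [' '] c)) e ↔
      x ∈ e ∨ ∃ c ∈ L, x = PySem.Chars.join [' '] c) := by
  induction L generalizing e with
  | nil => simp
  | cons c L ih =>
    simp only [List.foldl_cons, ih, PySem.Set.mem_add, List.mem_cons]
    constructor
    · rintro ((h | h) | h)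
      · exact Or.inl h
      · exact Or.inr ⟨c, Or.inl rfl, h⟩
      · obtain ⟨c', hc', rfl⟩ := h; exact Or.inr ⟨c', Or.inr hc', rfl⟩
    · rintro (h | ⟨c', (rfl | hc'), rfl⟩)
      · exact Or.inl (Or.inl h)
      · exact Or.inl (Or.inr rfl)
      · exact Or.inr ⟨c', hc', rfl⟩

theorem pvMemIterate (combos : List (List (List Char))) (L : List Int)
    (e : PySem.Set (List Char)) (x : List Char) :
    (x ∈ L.foldl (fun e _ =>
        combos.foldl (fun e c => PySem.Set.add e (PySem.Chars.join [' '] c)) e) e ↔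
      x ∈ e ∨ (L ≠ [] ∧ ∃ c ∈ combos, x = PySem.Chars.join [' '] c)) := by
  induction L generalizing e with
  | nil => simp
  | cons i L ih =>
    simp only [List.foldl_cons, ih, pvMemFoldlAdd]
    constructor
    · rintro ((h | h) | ⟨-, h⟩)
      · exact Or.inl h
      · exact Or.inr ⟨by simp, h⟩
      · exact Or.inr ⟨by simp, h⟩
    · rintro (h | ⟨-, h⟩)
      · exact Or.inl (Or.inl h)
      · exact Or.inl (Or.inr h)

theorem pvMemApv (names : List (List Char)) (x : List Char)
    (h : ∀ n ∈ names, PySem.Chars.split₀ n ≠ []) :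
    (x ∈ add_period_variants (PySem.Set.ofList names) ↔
      ∃ n ∈ names, x ∈ pvVs (PySem.Chars.split₀ n)) := by
  have key : ∀ (S : List (List Char)) (e : PySem.Set (List Char)),
      (∀ n ∈ S, PySem.Chars.split₀ n ≠ []) →
      (x ∈ S.foldl (fun expanded name =>
          let words := PySem.Chars.split₀ name
          (PySem.List.pyRange 0 (words.length : Int) 1).foldl (fun expanded _i =>
            (pvProduct (words.map (fun w => [w, w ++ ['.']]))).foldl
              (fun expanded combo => PySem.Set.add expanded (PySem.Chars.join [' '] combo))
              expanded)
            expanded) e ↔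
        x ∈ e ∨ ∃ n ∈ S, x ∈ pvVs (PySem.Chars.split₀ n)) := by
    intro S
    induction S with
    | nil => simp
    | cons n S ih =>
      intro e hS
      simp only [List.foldl_cons]
      rw [ih _ (fun m hm => hS m (List.mem_cons_of_mem n hm))]
      have hrange : PySem.List.pyRange 0 ((PySem.Chars.split₀ n).length : Int) 1 ≠ [] := by
        have h0 : (0 : Int) < ((PySem.Chars.split₀ n).length : Int) := by
          have := hS n (List.mem_cons_self)
          cases hsp : PySem.Chars.split₀ n with
          | nil => exact absurd hsp this
          | cons a l => simp
        rw [PySem.List.pyRange_one_cons h0]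
        simp
      rw [pvMemIterate]
      simp only [hrange, ne_eq, not_false_eq_true, true_and, List.mem_cons]
      constructor
      · rintro ((h1 | h1) | h1)
        · exact Or.inl h1
        · refine Or.inr ⟨n, Or.inl rfl, ?_⟩
          obtain ⟨c, hc, rfl⟩ := h1
          exact List.mem_map.mpr ⟨c, hc, rfl⟩
        · obtain ⟨m, hm, hx⟩ := h1; exact Or.inr ⟨m, Or.inr hm, hx⟩
      · rintro (h1 | ⟨m, (rfl | hm), hx⟩)
        · exact Or.inl (Or.inl h1)
        · refine Or.inl (Or.inr ?_)
          obtain ⟨c, hc, hcx⟩ := List.mem_map.mp hx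
          exact ⟨c, hc, hcx.symm⟩
        · exact Or.inr ⟨m, hm, hx⟩
  rw [show add_period_variants (PySem.Set.ofList names) =
      (PySem.Set.ofList names).foldl _ PySem.Set.empty from rfl]
  rw [key (PySem.Set.ofList names) PySem.Set.empty
      (fun n hn => h n ((PySem.Set.mem_ofList names n).mp hn))]
  simp only [PySem.Set.mem_ofList]
  constructor
  · rintro (h1 | h1)
    · exact absurd h1 (by simp [PySem.Set.empty])
    · exact h1
  · exact Or.inr

theorem pvAnyAddThe (s : PySem.Set (List Char)) (t : List Char) :
    ((pvAddThe s).any (fun n => PySem.Chars.isIn n t)) =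
      (s.any (fun n => PySem.Chars.isIn n t)) := by
  simp only [pvAddThe]
  apply Bool.eq_iff_iff.mpr
  simp only [List.any_eq_true, PySem.Chars.isIn_iff_infix]
  constructor
  · rintro ⟨x, hx, hinf⟩
    rcases (PySem.Set.mem_update s _ x).mp hx with hx' | hx'
    · exact ⟨x, hx', hinf⟩
    · rcases (PySem.Set.mem_ofList _ x).mp hx' with hx''
      rcases List.mem_map.mp hx'' with ⟨n, hn, rfl⟩
      exact ⟨n, hn, List.infix_append_right.trans hinf⟩
  · rintro ⟨n, hn, hinf⟩
    exact ⟨n, (PySem.Set.mem_update s _ n).mpr (Or.inl hn), hinf⟩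

theorem pvGroupAny (names : List (List Char))
    (h : ∀ n ∈ names, PySem.Chars.split₀ n ≠ [])
    (h2 : ∀ n ∈ names, ∀ w ∈ PySem.Chars.split₀ n, w ≠ []) (t : List Char) :
    ((pvAddThe (add_period_variants (PySem.Set.ofList names))).any
        (fun name => PySem.Chars.isIn name t)) =
      ((names.map PySem.Chars.split₀).any (fun ws => pvContains ws t)) := by
  rw [pvAnyAddThe]
  apply Bool.eq_iff_iff.mpr
  simp only [List.any_eq_true, PySem.Chars.isIn_iff_infix, List.mem_map]
  constructor
  · rintro ⟨v, hv, hinf⟩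
    rcases (pvMemApv names v h).mp hv with ⟨n, hn, hvv⟩
    exact ⟨PySem.Chars.split₀ n, ⟨n, hn, rfl⟩,
      (pvContains_iff _ (h n hn) (h2 n hn) t).mpr ⟨v, hvv, hinf⟩⟩
  · rintro ⟨ws, ⟨n, hn, rfl⟩, hc⟩
    rcases (pvContains_iff _ (h n hn) (h2 n hn) t).mp hc with ⟨v, hvv, hinf⟩
    exact ⟨v, (pvMemApv names v h).mpr ⟨n, hn, hvv⟩, hinf⟩

-- ===== VERDICT (by name: the statement is the Claim_ definition above) =====
theorem standardize_journal_name_spec : Claim_equal_standardize_journal_name := by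
  intro journal_name _dom
  unfold Spec_standardize_journal_name
  by_cases h : journal_name.toList = []
  · simp only [standardize_journal_name, if_pos h]
    rw [standardize_journal_name_alt, h]
    decide
  · simp only [standardize_journal_name, if_neg h]
    rw [standardize_journal_name_alt]
    rw [pvGroupAny pvJfeNames (by decide) (by decide), pvGroupAny pvJfNames (by decide) (by decide),
        pvGroupAny pvRfsNames (by decide) (by decide), pvGroupAny pvAerNames (by decide) (by decide),
        pvGroupAny pvEconometricaNames (by decide) (by decide), pvGroupAny pvQjeNames (by decide) (by decide),
        pvGroupAny pvResNames (by decide) (by decide), pvGroupAny pvJpeNames (by decide) (by decide)]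
    simp only [pvGroups, List.find?]
    set t := PySem.Chars.lower journal_name.toList
    by_cases h1 : (pvJfeNames.map PySem.Chars.split₀).any (fun ws => pvContains ws t) <;>
      simp only [h1, Bool.false_eq_true, Option.map_some] <;>
    by_cases h2 : (pvJfNames.map PySem.Chars.split₀).any (fun ws => pvContains ws t) <;>
      simp only [h2] <;>
    by_cases h3 : (pvRfsNames.map PySem.Chars.split₀).any (fun ws => pvContains ws t) <;>
      simp only [h3] <;>
    by_cases h4 : (pvAerNames.map PySem.Chars.split₀).any (fun ws => pvContains ws t) <;>
      simp only [h4] <;>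
    by_cases h5 : (pvEconometricaNames.map PySem.Chars.split₀).any (fun ws => pvContains ws t) <;>
      simp only [h5] <;>
    by_cases h6 : (pvQjeNames.map PySem.Chars.split₀).any (fun ws => pvContains ws t) <;>
      simp only [h6] <;>
    by_cases h7 : (pvResNames.map PySem.Chars.split₀).any (fun ws => pvContains ws t) <;>
      simp only [h7] <;>
    by_cases h8 : (pvJpeNames.map PySem.Chars.split₀).any (fun ws => pvContains ws t) <;>
      simp [h8]
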